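-- pv_equiv track=rewrite | github.com/hello0123/DMSH-simulation | MVT.py | count_handovers
-- ===== SOURCE A (Python) =====
-- from typing import List, Dict, Set, Tuple
-- from collections import defaultdict
--
-- def count_handovers(assignments: Dict[int, Dict[str, str]]) -> Dict[str, int]:
--     """
--     Count the number of handovers for each commodity during the simulation period.
--     A handover occurs when a commodity switches from one satellite to another.
--
--     Args:
--         assignments: Dictionary mapping time slots to assignments {t: {commodity_id: satellite_name}}
--
--     Returns:
--         Dictionary mapping commodity IDs to their total number of handovers
--     """
--     # Initialize handover counters and last known connections
--     handover_counts = defaultdict(int)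
--     last_connections = {}  # {commodity_id: (satellite, last_time_slot)}
--
--     # Get sorted time slots and find all unique commodities
--     time_slots = sorted(assignments.keys())
--     all_commodities = set()
--     for assignments_in_slot in assignments.values():
--         all_commodities.update(assignments_in_slot.keys())
--
--     # Process each time slot
--     for t in time_slots:
--         current_assignments = assignments[t]
--
--         # Check each commodity
--         for commodity in all_commodities:
--             current_satellite = current_assignments.get(commodity, None)
--
--             if commodity in last_connections:
--                 last_satellite, last_time = last_connections[commodity]
--
--                 # Case 1: Was connected before, now disconnected
--                 if current_satellite is None and last_satellite is not None:
--                     pass  # Not counting disconnection as handover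
--
--                 # Case 2: Was connected before, now connected to different satellite
--                 elif current_satellite is not None and current_satellite != last_satellite:
--                     handover_counts[commodity] += 1
--                     last_connections[commodity] = (current_satellite, t)
--
--                 # Case 3: Still connected to same satellite or still disconnected
--                 else:
--                     if current_satellite is not None:
--                         last_connections[commodity] = (current_satellite, t)
--
--             else:  # First time seeing this commodity
--                 if current_satellite is not None:
--                     last_connections[commodity] = (current_satellite, t)
--
--     # Convert defaultdict to regular dict for return
--     return dict(handover_counts)
-- ===== SOURCE B (Python) =====
-- def count_handovers(assignments):
--     """
--     Count handovers per commodity: one pass over the sorted time slots,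
--     visiting only the entries actually present in each slot and tracking
--     the last known satellite per commodity.
--     """
--     counts = {}
--     last = {}
--     for t in sorted(assignments):
--         for commodity, satellite in assignments[t].items():
--             previous = last.get(commodity)
--             if previous is not None and satellite != previous:
--                 counts[commodity] = counts.get(commodity, 0) + 1
--             last[commodity] = satellite
--     return counts
-- ===== Notes on version B (the rewrite author's own statement) =====
-- stated objective: faster
-- what changed: Instead of scanning the full commodity universe in every time slot with a four-case disconnect analysis, B makes one pass over the sorted slots visiting only the entries present in each slot, tracking just the last satellite per commodity, so the inner scan over all commodities disappears. …
import Mathlib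
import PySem

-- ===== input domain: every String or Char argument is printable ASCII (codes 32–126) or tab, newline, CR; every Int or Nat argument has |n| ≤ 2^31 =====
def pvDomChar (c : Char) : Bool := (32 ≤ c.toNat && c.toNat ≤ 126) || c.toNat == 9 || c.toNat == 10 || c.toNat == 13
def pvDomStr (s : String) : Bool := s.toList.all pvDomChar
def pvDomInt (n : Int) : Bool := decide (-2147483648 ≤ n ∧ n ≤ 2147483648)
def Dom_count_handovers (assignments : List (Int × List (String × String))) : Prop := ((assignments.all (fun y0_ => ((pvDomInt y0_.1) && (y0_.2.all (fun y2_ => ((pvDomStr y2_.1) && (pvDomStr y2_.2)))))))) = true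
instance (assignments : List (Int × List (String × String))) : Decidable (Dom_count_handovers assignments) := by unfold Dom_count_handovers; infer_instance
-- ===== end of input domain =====

-- B replaces A's per-slot scan of the whole commodity set by a single pass over the
-- entries actually present in each sorted slot, tracking only the last satellite per
-- commodity (measured faster only if a timing run reports it).

-- ===== PORT A =====
-- A-side helper: all commodity ids as a Python set, built by update() over the slot dicts
def pvCommOrder (assignments : List (Int × List (String × String))) : List String :=
  assignments.foldl (fun s p => PySem.Set.update s (p.2.map Prod.fst)) PySem.Set.empty

-- A-side helper: the body of A's inner 'for commodity in all_commodities' loop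
def pvStepA (current : List (String × String)) (t : Int)
    (st : PySem.Dict String Int × PySem.Dict String (String × Int)) (commodity : String) :
    PySem.Dict String Int × PySem.Dict String (String × Int) :=
  let cur : Option String := PySem.Dict.get? (PySem.Dict.mk current) commodity
  match PySem.Dict.get? st.2 commodity with
  | some last =>
    match cur with
    | none => st                                     -- case 1: disconnection, pass
    | some sat =>
      if sat ≠ last.1 then                           -- case 2: handover
        (PySem.Dict.modify st.1 commodity 0 (· + 1), PySem.Dict.insert st.2 commodity (sat, t))
      else                                           -- case 3: same satellite
        (st.1, PySem.Dict.insert st.2 commodity (sat, t))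
  | none =>                                          -- first time seeing this commodity
    match cur with
    | some sat => (st.1, PySem.Dict.insert st.2 commodity (sat, t))
    | none => st

def count_handovers (assignments : List (Int × List (String × String))) : List (String × Int) :=
  let d := PySem.Dict.mk assignments
  let time_slots := PySem.List.sorted (PySem.Dict.keys d) (fun x => x) false
  let all_commodities := pvCommOrder assignments
  -- assignments[t] for t drawn from the keys: the .getD [] default branch is unreachable
  (time_slots.foldl
    (fun st t => all_commodities.foldl (pvStepA ((PySem.Dict.get? d t).getD []) t) st)
    (PySem.Dict.empty, PySem.Dict.empty)).1.items

-- ===== PORT B =====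
-- B-side helper: the body of B's 'for commodity, satellite in assignments[t].items()' loop
def pvStepB (st : PySem.Dict String Int × PySem.Dict String String) (e : String × String) :
    PySem.Dict String Int × PySem.Dict String String :=
  let previous := PySem.Dict.get? st.2 e.1
  let counts := match previous with
    | some p => if e.2 ≠ p then PySem.Dict.insert st.1 e.1 (PySem.Dict.getD st.1 e.1 0 + 1) else st.1
    | none => st.1
  (counts, PySem.Dict.insert st.2 e.1 e.2)

def count_handovers_alt (assignments : List (Int × List (String × String))) : List (String × Int) :=
  let d := PySem.Dict.mk assignments
  ((PySem.List.sorted (PySem.Dict.keys d) (fun x => x) false).foldl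
    (fun st t => ((PySem.Dict.get? d t).getD []).foldl pvStepB st)
    (PySem.Dict.empty, PySem.Dict.empty)).1.items

-- ===== PRECONDITION & SPEC =====
-- Pre_ excludes inputs whose slot dicts list their commodities in an order inconsistent
-- with the commodities' first appearance across the input (or with repeated keys): there
-- A iterates an unordered Python set, so no key order of the returned dict is specified
-- and A's and B's orders are equally defensible; their counter values agree everywhere.
def Pre_count_handovers (assignments : List (Int × List (String × String))) : Prop :=
  ∀ p ∈ assignments,
    (pvCommOrder assignments).filter (fun c => decide (c ∈ p.2.map Prod.fst)) = p.2.map Prod.fst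
instance (assignments : List (Int × List (String × String))) : Decidable (Pre_count_handovers assignments) := by unfold Pre_count_handovers; infer_instance

def pvWitness_count_handovers : (List (Int × List (String × String))) :=
  [(0, [("a", "s1"), ("b", "s2")]), (1, [("a", "s2"), ("b", "s2")])]

def Spec_count_handovers (assignments : List (Int × List (String × String))) (out : List (String × Int)) : Prop := out = count_handovers_alt assignments
instance (assignments : List (Int × List (String × String))) (out : List (String × Int)) : Decidable (Spec_count_handovers assignments out) := by unfold Spec_count_handovers; infer_instance

-- ===== CLAIM (what is proved, stated in full; the proofs are below) =====
def Claim_equal_count_handovers : Prop := ∀ (assignments : List (Int × List (String × String))), Dom_count_handovers assignments → Pre_count_handovers assignments → Spec_count_handovers assignments (count_handovers assignments)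

-- ===== LEMMAS AND PROOFS =====

-- simulation relation between A's loop state and B's loop state
def pvRel (stA : PySem.Dict String Int × PySem.Dict String (String × Int))
    (stB : PySem.Dict String Int × PySem.Dict String String) : Prop :=
  stA.1 = stB.1 ∧ ∀ c, PySem.Dict.get? stB.2 c = (PySem.Dict.get? stA.2 c).map Prod.fst

theorem pv_foldl_sim {γ α β : Type} (R : α → β → Prop) (f : α → γ → α) (g : β → γ → β)
    (l : List γ) (h : ∀ x ∈ l, ∀ a b, R a b → R (f a x) (g b x)) :
    ∀ a b, R a b → R (l.foldl f a) (l.foldl g b) := by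
  induction l with
  | nil => intro a b hr; exact hr
  | cons x xs ih =>
    intro a b hr
    exact ih (fun y hy => h y (List.mem_cons_of_mem _ hy)) _ _ (h x List.mem_cons_self a b hr)

theorem pvStepA_absent (current : List (String × String)) (t : Int)
    (st : PySem.Dict String Int × PySem.Dict String (String × Int)) (c : String)
    (hc : c ∉ current.map Prod.fst) : pvStepA current t st c = st := by
  have hnone : PySem.Dict.get? (PySem.Dict.mk current) c = none := by
    rw [PySem.Dict.get?_eq_none_iff_not_mem_keys]
    simpa [PySem.Dict.keys] using hc
  unfold pvStepA
  cases h2 : PySem.Dict.get? st.2 c <;> simp [hnone]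

theorem pv_foldl_stepA_filter (current : List (String × String)) (t : Int) (S : List String) :
    ∀ st, S.foldl (pvStepA current t) st
      = (S.filter (fun c => decide (c ∈ current.map Prod.fst))).foldl (pvStepA current t) st := by
  induction S with
  | nil => intro st; rfl
  | cons x xs ih =>
    intro st
    by_cases hx : x ∈ current.map Prod.fst
    · rw [List.foldl_cons, ih, List.filter_cons]
      simp [hx, List.foldl_cons]
    · rw [List.foldl_cons, pvStepA_absent current t st x hx, ih, List.filter_cons]
      simp [hx]

theorem pvStep_sim (current : List (String × String)) (t : Int)
    (hnd : (current.map Prod.fst).Nodup) (e : String × String) (he : e ∈ current)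
    (stA : PySem.Dict String Int × PySem.Dict String (String × Int))
    (stB : PySem.Dict String Int × PySem.Dict String String)
    (hr : pvRel stA stB) : pvRel (pvStepA current t stA e.1) (pvStepB stB e) := by
  obtain ⟨h1, h2⟩ := hr
  have hget : PySem.Dict.get? (PySem.Dict.mk current) e.1 = some e.2 := by
    apply PySem.Dict.get?_of_mem_items
    · simpa using he
    · simpa [PySem.Dict.keys] using hnd
  unfold pvStepA pvStepB
  cases hA : PySem.Dict.get? stA.2 e.1 with
  | none =>
    have hB : PySem.Dict.get? stB.2 e.1 = none := by rw [h2, hA]; rfl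
    refine ⟨by simpa [hget, hB] using h1, ?_⟩
    intro c
    simp only [hget]
    by_cases hc : c = e.1 <;> simp [PySem.Dict.get?_insert, hc, h2]
  | some last =>
    have hB : PySem.Dict.get? stB.2 e.1 = some last.1 := by rw [h2, hA]; rfl
    by_cases hne : e.2 = last.1
    · refine ⟨by simpa [hget, hB, hne] using h1, ?_⟩
      intro c
      simp only [hget, hne]
      by_cases hc : c = e.1 <;> simp [PySem.Dict.get?_insert, hc, h2]
    · refine ⟨?_, ?_⟩
      · simp [hget, hB, hne, h1, PySem.Dict.modify]
      · intro c
        simp only [hget]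
        by_cases hc : c = e.1 <;> simp [hne, PySem.Dict.get?_insert, hc, h2]

theorem pvCommOrder_nodup_aux (l : List (Int × List (String × String))) :
    ∀ s : PySem.Set String, s.Nodup →
      (l.foldl (fun s p => PySem.Set.update s (p.2.map Prod.fst)) s).Nodup := by
  induction l with
  | nil => intro s hs; exact hs
  | cons x xs ih => intro s hs; exact ih _ (PySem.Set.nodup_update _ _ hs)

theorem pvCommOrder_nodup (assignments : List (Int × List (String × String))) :
    (pvCommOrder assignments).Nodup :=
  pvCommOrder_nodup_aux assignments _ List.nodup_nil

theorem pv_slot_sim (assignments : List (Int × List (String × String))) (t : Int)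
    (dl : List (String × String))
    (hfilter : (pvCommOrder assignments).filter (fun c => decide (c ∈ dl.map Prod.fst)) = dl.map Prod.fst)
    (stA : PySem.Dict String Int × PySem.Dict String (String × Int))
    (stB : PySem.Dict String Int × PySem.Dict String String) (hr : pvRel stA stB) :
    pvRel ((pvCommOrder assignments).foldl (pvStepA dl t) stA) (dl.foldl pvStepB stB) := by
  have hnd : (dl.map Prod.fst).Nodup := by
    rw [← hfilter]; exact (pvCommOrder_nodup assignments).filter _
  rw [pv_foldl_stepA_filter, hfilter, List.foldl_map]
  exact pv_foldl_sim pvRel _ pvStepB dl (fun e he a b hab => pvStep_sim dl t hnd e he a b hab) stA stB hr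

-- ===== VERDICT (by name: the statement is the Claim_ definition above) =====
theorem count_handovers_spec : Claim_equal_count_handovers := by
  unfold Claim_equal_count_handovers
  intro assignments _ hpre
  unfold Spec_count_handovers count_handovers count_handovers_alt
  simp only []
  have main : pvRel
      ((PySem.List.sorted (PySem.Dict.keys (PySem.Dict.mk assignments)) (fun x => x) false).foldl
        (fun st t => (pvCommOrder assignments).foldl
          (pvStepA ((PySem.Dict.get? (PySem.Dict.mk assignments) t).getD []) t) st)
        (PySem.Dict.empty, PySem.Dict.empty))
      ((PySem.List.sorted (PySem.Dict.keys (PySem.Dict.mk assignments)) (fun x => x) false).foldl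
        (fun st t => ((PySem.Dict.get? (PySem.Dict.mk assignments) t).getD []).foldl pvStepB st)
        (PySem.Dict.empty, PySem.Dict.empty)) := by
    apply pv_foldl_sim pvRel _ _ _ _ _ _ ⟨rfl, fun c => rfl⟩
    intro x hx a b hab
    rw [PySem.List.mem_sorted] at hx
    cases hget : PySem.Dict.get? (PySem.Dict.mk assignments) x with
    | none =>
      exact absurd hx ((PySem.Dict.get?_eq_none_iff_not_mem_keys _ _).mp hget)
    | some dl =>
      have hmem : (x, dl) ∈ assignments := by
        have := PySem.Dict.mem_items_of_get?_eq_some (PySem.Dict.mk assignments) hget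
        simpa using this
      simpa [hget] using pv_slot_sim assignments x dl (hpre _ hmem) a b hab
  exact congrArg PySem.Dict.items main.1
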